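-- pv_equiv track=rewrite | github.com/Lee12369/BJproblem | 2023-08-28/01-17825.py | escape_list
-- ===== SOURCE A (Python) =====
-- def escape_list(board, row, column):
--     # 배열의 길이를 벗어날 경우.
--     N = len(board[row])
--     if column >= N:
--         if row == 0 or row == 4:
--             row = 5
--             column = 0
--         elif row == 1 or row == 2 or row == 3:
--             row = 4
--             # 다시 재귀를 돌리는 이유는 4변째 행 기준으로 column이 배열의 길이를 벗어날 수도 있기 때문이다. 예를 들어 26번 위치에서 5가 떠서 움직일 경우, 다음 배열을 건너뛰고 도착지점인 row = 5에 도착하게 된다. 그렇게 되면 row = 4로 되어있는 지금 indexError가 뜰 수 있다.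
--             return escape_list(board, row, column - N)
--     return row, column
-- ===== SOURCE B (Python) =====
-- def escape_list(board, row, column):
--     # Direct case analysis: the original's one-level recursion is inlined
--     # into a flat early-return chain, computing the final cell directly.
--     n = len(board[row])
--     if column < n:
--         return row, column
--     if row == 0 or row == 4:
--         return 5, 0
--     if 1 <= row <= 3:
--         c = column - n
--         return (5, 0) if c >= len(board[4]) else (4, c)
--     return row, column
-- ===== Notes on version B (the rewrite author's own statement) =====
-- stated objective: simpler
-- what changed: Replaces the bounded recursive call with a flat early-return chain that computes the destination cell directly (the rows-1..3 overflow case handled in place by one comparison against len(board[4])).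
import Mathlib
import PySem

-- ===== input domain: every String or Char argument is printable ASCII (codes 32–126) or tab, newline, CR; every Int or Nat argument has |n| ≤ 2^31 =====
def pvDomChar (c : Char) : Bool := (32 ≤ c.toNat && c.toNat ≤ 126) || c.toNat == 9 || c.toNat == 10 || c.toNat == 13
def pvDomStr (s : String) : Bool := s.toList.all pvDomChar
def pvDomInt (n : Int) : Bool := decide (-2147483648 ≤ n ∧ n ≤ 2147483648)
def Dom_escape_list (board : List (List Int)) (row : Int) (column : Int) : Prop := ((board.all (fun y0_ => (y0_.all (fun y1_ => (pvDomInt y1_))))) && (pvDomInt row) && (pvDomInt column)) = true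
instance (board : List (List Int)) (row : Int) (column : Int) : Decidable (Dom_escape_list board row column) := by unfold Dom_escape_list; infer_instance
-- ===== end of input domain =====

-- ===== PORT A =====
-- A is the given at-most-one-level recursion; ported with a fuel bounded at 2
-- (the Python recursion fires at most once: the recursive call has row = 4).
def escape_go (fuel : Nat) (board : List (List Int)) (row : Int) (column : Int) : Int × Int :=
  match fuel with
  | 0 => (row, column)  -- never reached for fuel = 2
  | fuel + 1 =>
    match PySem.List.pyGet? board row with
    | none => (row, column)  -- IndexError in Python; excluded by Pre_
    | some r =>
      let N : Int := r.length
      if column ≥ N then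
        if row = 0 ∨ row = 4 then (5, 0)
        else if row = 1 ∨ row = 2 ∨ row = 3 then
          escape_go fuel board 4 (column - N)
        else (row, column)
      else (row, column)

def escape_list (board : List (List Int)) (row : Int) (column : Int) : Int × Int :=
  escape_go 2 board row column

-- ===== PORT B =====
-- B: flat early-return chain, no recursion; the rows 1..3 overflow case is
-- decided in place by one comparison against len(board[4]).
def escape_list_alt (board : List (List Int)) (row : Int) (column : Int) : Int × Int :=
  match PySem.List.pyGet? board row with
  | none => (row, column)  -- IndexError in Python; excluded by Pre_
  | some r =>
    if column < (r.length : Int) then (row, column)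
    else if row = 0 ∨ row = 4 then (5, 0)
    else if 1 ≤ row ∧ row ≤ 3 then
      let c : Int := column - r.length
      match PySem.List.pyGet? board 4 with
      | none => (4, c)  -- IndexError in Python; excluded by Pre_
      | some r4 => if c ≥ (r4.length : Int) then (5, 0) else (4, c)
    else (row, column)

-- ===== PRECONDITION & SPEC =====
-- Pre_ = exactly where Python A returns: row is a valid (possibly negative)
-- index into board, and when a row in {1,2,3} overflows its length the board
-- must have a row 4 (else Python A raises IndexError in the recursive call).
def Pre_escape_list (board : List (List Int)) (row : Int) (column : Int) : Prop :=
  PySem.Raise.InRange board.length row ∧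
  ((row = 1 ∨ row = 2 ∨ row = 3) →
    column ≥ (((PySem.List.pyGet? board row).getD []).length : Int) →
    5 ≤ board.length)
instance (board : List (List Int)) (row : Int) (column : Int) : Decidable (Pre_escape_list board row column) := by unfold Pre_escape_list; infer_instance
def pvWitness_escape_list : List (List Int) × Int × Int := ([[1], [2], [3], [4], [5], []], 1, 5)
def Spec_escape_list (board : List (List Int)) (row : Int) (column : Int) (out : Int × Int) : Prop := out = escape_list_alt board row column
instance (board : List (List Int)) (row : Int) (column : Int) (out : Int × Int) : Decidable (Spec_escape_list board row column out) := by unfold Spec_escape_list; infer_instance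

-- ===== CLAIM (what is proved, stated in full; the proofs are below) =====
def Claim_equal_escape_list : Prop := ∀ (board : List (List Int)) (row : Int) (column : Int), Dom_escape_list board row column → Pre_escape_list board row column → Spec_escape_list board row column (escape_list board row column)

-- ===== LEMMAS AND PROOFS =====
-- The two ports agree on every input (both return (row, column)-shaped
-- defaults where Python would raise, and those defaults coincide).
theorem escape_go_eq_alt (board : List (List Int)) (row column : Int) :
    escape_go 2 board row column = escape_list_alt board row column := by
  unfold escape_go escape_list_alt
  cases h : PySem.List.pyGet? board row with
  | none => rfl
  | some r =>
    simp only []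
    by_cases hc : column ≥ (r.length : Int)
    · by_cases h04 : row = 0 ∨ row = 4
      · simp [hc, h04, show ¬ column < (r.length : Int) by omega]
      · by_cases h123 : row = 1 ∨ row = 2 ∨ row = 3
        · have h13 : 1 ≤ row ∧ row ≤ 3 := by rcases h123 with h | h | h <;> omega
          simp only [if_pos hc, if_neg h04, if_pos h123,
            show ¬ column < (r.length : Int) by omega, if_pos h13]
          unfold escape_go
          cases h4 : PySem.List.pyGet? board 4 with
          | none => rfl
          | some r4 =>
            by_cases hc4 : column - (r.length : Int) ≥ (r4.length : Int)
            · simp [hc4]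
            · simp [hc4]
        · have h13 : ¬ (1 ≤ row ∧ row ≤ 3) := by
            intro ⟨a, b⟩; apply h123; omega
          simp [hc, h04, h123, h13, show ¬ column < (r.length : Int) by omega]
    · simp [hc, show column < (r.length : Int) by omega]

-- ===== VERDICT (by name: the statement is the Claim_ definition above) =====
theorem escape_list_spec : Claim_equal_escape_list := by
  intro board row column _ _
  unfold Spec_escape_list escape_list
  exact escape_go_eq_alt board row column
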